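-- pv_equiv track=rewrite | github.com/1AlgoRythm/cash-flow-optimizer---DSA-- | CF_minimizer.py | settle_debts
-- ===== SOURCE A (Python) =====
-- import heapq
--
-- def settle_debts(net_amounts):
--     # Create heaps for creditors and debtors for efficient retrieval
--     creditors = [(-amount, person) for person, amount in net_amounts.items() if amount > 0]
--     debtors = [(amount, person) for person, amount in net_amounts.items() if amount < 0]
--     heapq.heapify(creditors)
--     heapq.heapify(debtors)
--
--     # List to store the transactions that settle the debts
--     transactions = []
--
--     # Settle debts by matching the largest creditor with the largest debtor
--     while creditors and debtors:
--         credit, creditor = heapq.heappop(creditors)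
--         debt, debtor = heapq.heappop(debtors)
--
--         # Determine the amount to settle in this transaction
--         settled_amount = min(-debt, -credit)
--         transactions.append((debtor, creditor, settled_amount))
--
--         # If there's remaining debt or credit, push back to the heap
--         if -debt > settled_amount:
--             heapq.heappush(debtors, (debt + settled_amount, debtor))
--         if -credit > settled_amount:
--             heapq.heappush(creditors, (credit + settled_amount, creditor))
--
--     return transactions
-- ===== SOURCE B (Python) =====
-- def _insert(lst, item, cred):
--     # insert item into a list kept sorted by the side's heap key, recursively
--     if not lst:
--         return [item]
--     key = (lambda x: (-x[1], x[0])) if cred else (lambda x: (x[1], x[0]))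
--     if key(item) < key(lst[0]):
--         return [item] + lst
--     return [lst[0]] + _insert(lst[1:], item, cred)
--
--
-- def settle_debts(net_amounts):
--     # Sort each side once by its heap key (largest magnitude first, ties by
--     # smallest name); each round settles the two heads and re-inserts any
--     # remainder at its sorted position.  No heaps, no sign-flipped tuples.
--     creditors = sorted([(p, a) for p, a in net_amounts.items() if a > 0],
--                        key=lambda x: (-x[1], x[0]))
--     debtors = sorted([(p, a) for p, a in net_amounts.items() if a < 0],
--                      key=lambda x: (x[1], x[0]))
--     transactions = []
--     while creditors and debtors:
--         (cp, ca), creditors = creditors[0], creditors[1:]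
--         (dp, da), debtors = debtors[0], debtors[1:]
--         s = min(ca, -da)
--         transactions.append((dp, cp, s))
--         if ca - s > 0:
--             creditors = _insert(creditors, (cp, ca - s), True)
--         if da + s < 0:
--             debtors = _insert(debtors, (dp, da + s), False)
--     return transactions
-- ===== Notes on version B (the rewrite author's own statement) =====
-- stated objective: alternative
-- what changed: Replaces the two heapq heaps of sign-flipped (-amount, person) tuples by two lists sorted once by the heap key (largest magnitude first, ties by smallest name); each round settles the two heads and re-inserts any remainder at its sorted position via a recursive ordered-insert helper.
import Mathlib
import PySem

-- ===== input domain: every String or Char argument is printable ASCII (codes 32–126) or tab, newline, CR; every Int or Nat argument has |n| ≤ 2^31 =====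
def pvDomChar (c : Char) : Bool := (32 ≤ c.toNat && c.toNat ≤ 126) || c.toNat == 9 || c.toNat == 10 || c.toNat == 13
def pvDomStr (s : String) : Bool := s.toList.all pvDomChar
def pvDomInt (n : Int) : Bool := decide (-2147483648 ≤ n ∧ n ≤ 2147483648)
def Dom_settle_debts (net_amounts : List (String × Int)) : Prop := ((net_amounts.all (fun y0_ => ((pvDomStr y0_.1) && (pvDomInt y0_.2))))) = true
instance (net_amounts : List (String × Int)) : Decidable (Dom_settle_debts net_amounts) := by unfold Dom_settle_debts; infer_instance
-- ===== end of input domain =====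

-- B replaces A's two heapq heaps of sign-flipped (-amount, person) tuples by two
-- lists sorted once by the heap key, settling the heads each round and
-- re-inserting any remainder at its sorted position; objective: alternative.

-- generic helper (cited by pvLoopA's termination proof): a fold that keeps
-- either the accumulator or the new element returns a member of the list
theorem pvPick_mem {α : Type} (f : α → α → Bool) (xs : List α) (x : α) :
    List.foldl (fun b y => if f y b then y else b) x xs ∈ x :: xs := by
  induction xs generalizing x with
  | nil => simp
  | cons y ys ih =>
    simp only [List.foldl_cons]
    rcases List.mem_cons.1 (ih (if f y x then y else x)) with h | h
    · rw [h]; split_ifs <;> simp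
    · simp [h]

-- ===== PORT A =====
-- Python tuple comparison on heap entries (amount, person): lexicographic
def pvLexLt (a b : Int × String) : Bool :=
  decide (a.1 < b.1) || (decide (a.1 = b.1) && decide (a.2 < b.2))

-- heapq model, value-faithful: heappop returns the least tuple of the heap's
-- contents; we keep the contents as a list, pop = least element (this fold)
-- erased, push = append.  heapify is a value-level no-op.
def pvHeapMin (x : Int × String) (xs : List (Int × String)) : Int × String :=
  List.foldl (fun b y => if pvLexLt y b then y else b) x xs

def pvLoopA : List (Int × String) → List (Int × String) → List (String × String × Int)
  | [], _ => []
  | _ :: _, [] => []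
  | c0 :: cr, d0 :: dr =>
    let c := pvHeapMin c0 cr          -- credit, creditor = heappop(creditors)
    let d := pvHeapMin d0 dr          -- debt, debtor = heappop(debtors)
    let settled := min (-d.1) (-c.1)
    let cs1 := (c0 :: cr).erase c
    let ds1 := (d0 :: dr).erase d
    let ds2 := if -d.1 > settled then ds1 ++ [(d.1 + settled, d.2)] else ds1
    let cs2 := if -c.1 > settled then cs1 ++ [(c.1 + settled, c.2)] else cs1
    (d.2, c.2, settled) :: pvLoopA cs2 ds2
  termination_by cs ds => cs.length + ds.length
  decreasing_by
    have hcm : pvHeapMin c0 cr ∈ c0 :: cr := pvPick_mem pvLexLt cr c0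
    have hdm : pvHeapMin d0 dr ∈ d0 :: dr := pvPick_mem pvLexLt dr d0
    have hc := List.length_erase_of_mem hcm
    have hd := List.length_erase_of_mem hdm
    simp only [List.length_cons, Nat.add_sub_cancel] at hc hd
    rcases min_cases (-(pvHeapMin d0 dr).1) (-(pvHeapMin c0 cr).1) with ⟨he, _⟩ | ⟨he, _⟩ <;>
      rw [he] <;> split_ifs <;>
      simp only [List.length_append, List.length_cons, List.length_nil, hc, hd] <;> omega

def settle_debts (net_amounts : List (String × Int)) : List (String × String × Int) :=
  pvLoopA
    (net_amounts.filterMap (fun pa => if pa.2 > 0 then some (-pa.2, pa.1) else none))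
    (net_amounts.filterMap (fun pa => if pa.2 < 0 then some (pa.2, pa.1) else none))

-- ===== PORT B =====
-- _insert(lst, item, cred): ordered insert by the side's key tuple, recursive
def pvIns (cred : Bool) (item : String × Int) : List (String × Int) → List (String × Int)
  | [] => [item]
  | x :: xs =>
    -- key(item) < key(lst[0]) : Python tuple comparison for the side's key
    let lt := if cred
      then decide (-item.2 < -x.2) || (decide ((-item.2 : Int) = -x.2) && decide (item.1 < x.1))
      else decide (item.2 < x.2) || (decide (item.2 = x.2) && decide (item.1 < x.1))
    if lt then item :: x :: xs else x :: pvIns cred item xs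

theorem pvIns_length (cred : Bool) (item : String × Int) :
    ∀ l : List (String × Int), (pvIns cred item l).length = l.length + 1 := by
  intro l
  induction l with
  | nil => rfl
  | cons x xs ih => simp only [pvIns]; split_ifs <;> simp [ih]

-- the while loop: pop both heads, settle, re-insert remainders in order
def pvLoopB : List (String × Int) → List (String × Int) → List (String × String × Int)
  | [], _ => []
  | _ :: _, [] => []
  | (cp, ca) :: cr, (dp, da) :: dr =>
    let s := min ca (-da)
    let cr2 := if ca - s > 0 then pvIns true (cp, ca - s) cr else cr
    let dr2 := if da + s < 0 then pvIns false (dp, da + s) dr else dr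
    (dp, cp, s) :: pvLoopB cr2 dr2
  termination_by cs ds => cs.length + ds.length
  decreasing_by
    rcases min_cases ca (-da) with ⟨he, _⟩ | ⟨he, _⟩ <;>
      rw [he] <;> split_ifs <;>
      simp only [pvIns_length, List.length_cons] <;> omega

def settle_debts_alt (net_amounts : List (String × Int)) : List (String × String × Int) :=
  pvLoopB
    (PySem.List.sorted2 (net_amounts.filter (fun pa => decide (pa.2 > 0)))
      (fun x => -x.2) (fun x => x.1))
    (PySem.List.sorted2 (net_amounts.filter (fun pa => decide (pa.2 < 0)))
      (fun x => x.2) (fun x => x.1))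

-- ===== PRECONDITION & SPEC =====
def Spec_settle_debts (net_amounts : List (String × Int)) (out : List (String × String × Int)) : Prop := out = settle_debts_alt net_amounts
instance (net_amounts : List (String × Int)) (out : List (String × String × Int)) : Decidable (Spec_settle_debts net_amounts out) := by unfold Spec_settle_debts; infer_instance

-- ===== CLAIM (what is proved, stated in full; the proofs are below) =====
def Claim_equal_settle_debts : Prop := ∀ (net_amounts : List (String × Int)), Dom_settle_debts net_amounts → Spec_settle_debts net_amounts (settle_debts net_amounts)

-- ===== LEMMAS AND PROOFS =====

-- the two embeddings of B's (person, amount) pairs into A's heap tuples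
def pvTc (x : String × Int) : Int × String := (-x.2, x.1)
def pvTd (x : String × Int) : Int × String := (x.2, x.1)
def pvT (cred : Bool) : (String × Int) → Int × String := if cred then pvTc else pvTd

-- order theory of the heap-tuple order
theorem pvLexLt_asymm_eq {a b : Int × String} (h1 : pvLexLt a b = false)
    (h2 : pvLexLt b a = false) : a = b := by
  rcases a with ⟨ai, as⟩; rcases b with ⟨bi, bs⟩
  simp only [pvLexLt, Bool.or_eq_false_iff, Bool.and_eq_false_iff,
    decide_eq_false_iff_not] at h1 h2
  have hab : ai = bi := by omega
  subst hab
  rcases h1.2 with h | h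
  · exact absurd rfl h
  · rcases h2.2 with h' | h'
    · exact absurd rfl h'
    · have : as = bs := le_antisymm (not_lt.1 h') (not_lt.1 h)
      simp [this]

theorem pvLexLt_trans {a b c : Int × String} (h1 : pvLexLt a b = true)
    (h2 : pvLexLt b c = true) : pvLexLt a c = true := by
  rcases a with ⟨ai, as⟩; rcases b with ⟨bi, bs⟩; rcases c with ⟨ci, cs⟩
  simp only [pvLexLt, Bool.or_eq_true, Bool.and_eq_true, decide_eq_true_eq] at h1 h2 ⊢
  rcases h1 with h | ⟨he, hs⟩ <;> rcases h2 with h' | ⟨he', hs'⟩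
  · exact Or.inl (by omega)
  · exact Or.inl (by omega)
  · exact Or.inl (by omega)
  · exact Or.inr ⟨by omega, lt_trans hs hs'⟩

theorem pvLexLt_irrefl (a : Int × String) : pvLexLt a a = false := by
  simp [pvLexLt]

theorem pvLexLt_asymm {a b : Int × String} (h : pvLexLt a b = true) :
    pvLexLt b a = false := by
  cases hba : pvLexLt b a with
  | false => rfl
  | true => exact absurd (pvLexLt_trans h hba) (by simp [pvLexLt_irrefl])

theorem pvLexLt_le_lt_trans {a b c : Int × String} (h1 : pvLexLt b a = false)
    (h2 : pvLexLt b c = true) : pvLexLt a c = true := by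
  rcases a with ⟨ai, as⟩; rcases b with ⟨bi, bs⟩; rcases c with ⟨ci, cs⟩
  simp only [pvLexLt, Bool.or_eq_true, Bool.and_eq_true, decide_eq_true_eq,
    Bool.or_eq_false_iff, Bool.and_eq_false_iff, decide_eq_false_iff_not] at h1 h2 ⊢
  obtain ⟨h1a, h1b⟩ := h1
  rcases h2 with h | ⟨he, hs⟩
  · exact Or.inl (by omega)
  · by_cases hac : ai < ci
    · exact Or.inl hac
    · have hai : ai = bi := by omega
      rcases h1b with hne | hsle
      · exact absurd hai.symm hne
      · exact Or.inr ⟨by omega, lt_of_le_of_lt (not_lt.1 hsle) hs⟩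

-- the fold result is minimal w.r.t. pvLexLt among x :: xs
theorem pvHeapMin_not_lt (x : Int × String) (xs : List (Int × String)) :
    ∀ z ∈ x :: xs, pvLexLt z (pvHeapMin x xs) = false := by
  induction xs generalizing x with
  | nil => intro z hz; simp at hz; subst hz; exact pvLexLt_irrefl _
  | cons y ys ih =>
    intro z hz
    have hstep : pvHeapMin x (y :: ys) = pvHeapMin (if pvLexLt y x then y else x) ys := by
      simp [pvHeapMin]
    rw [hstep]
    have ih' := ih (if pvLexLt y x then y else x)
    rcases List.mem_cons.1 hz with hzx | hz'
    · rw [hzx]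
      by_cases hf : pvLexLt y x = true
      · rw [if_pos hf] at ih' ⊢
        by_contra hx
        have hx' : pvLexLt x (pvHeapMin y ys) = true := by
          cases hxx : pvLexLt x (pvHeapMin y ys) with
          | false => exact absurd hxx hx
          | true => rfl
        exact absurd (pvLexLt_trans hf hx') (by simpa using ih' y List.mem_cons_self)
      · rw [if_neg hf] at ih' ⊢
        exact ih' x List.mem_cons_self
    · rcases List.mem_cons.1 hz' with hzy | hz''
      · rw [hzy]
        by_cases hf : pvLexLt y x = true
        · rw [if_pos hf] at ih' ⊢
          exact ih' y List.mem_cons_self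
        · rw [if_neg hf] at ih' ⊢
          by_contra hy
          have hy' : pvLexLt y (pvHeapMin x ys) = true := by
            cases hyy : pvLexLt y (pvHeapMin x ys) with
            | false => exact absurd hyy hy
            | true => rfl
          have hf' : pvLexLt y x = false := by simpa using hf
          exact absurd (pvLexLt_le_lt_trans hf' hy') (by simpa using ih' x List.mem_cons_self)
      · split_ifs at ih' ⊢ <;> exact ih' z (List.mem_cons_of_mem _ hz'')

-- B's ordered insert is PySem's insertBy under the side's embedding
theorem pvIns_eq_insertBy (cred : Bool) (item : String × Int) (l : List (String × Int)) :
    pvIns cred item l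
      = PySem.List.insertBy (fun a b => pvLexLt (pvT cred a) (pvT cred b)) item l := by
  induction l with
  | nil => cases cred <;> rfl
  | cons x xs ih =>
    cases cred <;>
      simp only [pvIns, PySem.List.insertBy, pvT, pvTc, pvTd, pvLexLt, if_true, if_false] <;>
      rw [ih] <;> rfl

-- insertBy with a strict order preserves sortedness (Pairwise of "not greater")
theorem pvInsertBy_pairwise {α : Type} (lt : α → α → Bool)
    (htrans : ∀ a b c, lt a b = true → lt b c = true → lt a c = true)
    (hasym : ∀ a b, lt a b = true → lt b a = false)
    (x : α) (l : List α) (h : l.Pairwise (fun a b => lt b a = false)) :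
    (PySem.List.insertBy lt x l).Pairwise (fun a b => lt b a = false) := by
  induction l with
  | nil => simp [PySem.List.insertBy]
  | cons y ys ih =>
    rw [List.pairwise_cons] at h
    show (if lt x y = true then x :: y :: ys else y :: PySem.List.insertBy lt x ys).Pairwise _
    cases hxy : lt x y with
    | true =>
      rw [if_pos rfl]
      refine List.pairwise_cons.2 ⟨?_, List.pairwise_cons.2 h⟩
      intro z hz
      rcases List.mem_cons.1 hz with rfl | hz'
      · exact hasym _ _ hxy
      · cases hzx : lt z x with
        | false => rfl
        | true => exact absurd (htrans _ _ _ hzx hxy) (by simp [h.1 z hz'])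
    | false =>
      rw [if_neg (by simp)]
      refine List.pairwise_cons.2 ⟨?_, ih h.2⟩
      intro z hz
      rcases (PySem.List.mem_insertBy lt x z ys).1 hz with rfl | hz'
      · exact hxy
      · exact h.1 z hz'

-- a foldl of insertBy keeps the list sorted
theorem pvFoldlInsert_pairwise {α : Type} (lt : α → α → Bool)
    (htrans : ∀ a b c, lt a b = true → lt b c = true → lt a c = true)
    (hasym : ∀ a b, lt a b = true → lt b a = false) :
    ∀ (xs acc : List α), acc.Pairwise (fun a b => lt b a = false) →
      (xs.foldl (fun acc x => PySem.List.insertBy lt x acc) acc).Pairwise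
        (fun a b => lt b a = false) := by
  intro xs
  induction xs with
  | nil => intro acc h; exact h
  | cons x xs ih =>
    intro acc h
    exact ih _ (pvInsertBy_pairwise lt htrans hasym x acc h)

-- sorted2 with the creditor key is the insertBy fold under pvTc's order
theorem pvSorted2_eq (cred : Bool) (xs : List (String × Int)) :
    (if cred
      then PySem.List.sorted2 xs (fun x => -x.2) (fun x => x.1)
      else PySem.List.sorted2 xs (fun x => x.2) (fun x => x.1))
      = xs.foldl (fun acc x =>
          PySem.List.insertBy (fun a b => pvLexLt (pvT cred a) (pvT cred b)) x acc) [] := by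
  have hfun : ∀ (k1 : (String × Int) → Int) (f : (String × Int) → Int × String),
      (∀ x, (f x).1 = k1 x ∧ (f x).2 = x.1) →
      (fun (a b : String × Int) =>
        decide (k1 a < k1 b) || (!decide (k1 b < k1 a) && decide (a.1 < b.1)))
      = fun a b => pvLexLt (f a) (f b) := by
    intro k1 f hf
    funext a b
    obtain ⟨ha1, ha2⟩ := hf a
    obtain ⟨hb1, hb2⟩ := hf b
    simp only [pvLexLt, ha1, ha2, hb1, hb2]
    by_cases h1 : k1 a < k1 b
    · simp [h1]
    · by_cases h2 : k1 a = k1 b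
      · simp [h1, h2, lt_irrefl]
      · simp [h1, h2, show k1 b < k1 a by omega]
  cases cred with
  | true =>
    rw [if_pos rfl]
    show List.foldl (fun acc x => PySem.List.insertBy _ x acc) [] xs = _
    rw [hfun (fun x => -x.2) (pvT true) (fun x => ⟨rfl, rfl⟩)]
    rfl
  | false =>
    rw [if_neg (by simp)]
    show List.foldl (fun acc x => PySem.List.insertBy _ x acc) [] xs = _
    rw [hfun (fun x => x.2) (pvT false) (fun x => ⟨rfl, rfl⟩)]
    rfl

theorem pvSorted2_perm' (cred : Bool) (xs : List (String × Int)) :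
    (xs.foldl (fun acc x =>
        PySem.List.insertBy (fun a b => pvLexLt (pvT cred a) (pvT cred b)) x acc) []).Perm xs := by
  have := pvSorted2_eq cred xs
  cases cred with
  | true => rw [if_pos rfl] at this; rw [← this]; exact PySem.List.sorted2_perm _ _ _ _
  | false => rw [if_neg (by simp)] at this; rw [← this]; exact PySem.List.sorted2_perm _ _ _ _

theorem pvT_lex_trans (cred : Bool) : ∀ a b c : String × Int,
    pvLexLt (pvT cred a) (pvT cred b) = true → pvLexLt (pvT cred b) (pvT cred c) = true →
    pvLexLt (pvT cred a) (pvT cred c) = true :=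
  fun _ _ _ h1 h2 => pvLexLt_trans h1 h2

theorem pvT_lex_asym (cred : Bool) : ∀ a b : String × Int,
    pvLexLt (pvT cred a) (pvT cred b) = true → pvLexLt (pvT cred b) (pvT cred a) = false :=
  fun _ _ h => pvLexLt_asymm h

-- the heap minimum of any permutation of a sorted list's image is its head's image
theorem pvHeadMin (f : (String × Int) → Int × String) (c0 : Int × String)
    (cr : List (Int × String)) (h : String × Int) (t : List (String × Int))
    (hp : (c0 :: cr).Perm ((h :: t).map f))
    (hs : (h :: t).Pairwise (fun a b => pvLexLt (f b) (f a) = false)) :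
    pvHeapMin c0 cr = f h := by
  have hm : pvHeapMin c0 cr ∈ c0 :: cr := pvPick_mem pvLexLt cr c0
  have hm' : pvHeapMin c0 cr ∈ (h :: t).map f := hp.mem_iff.1 hm
  rcases List.mem_map.1 hm' with ⟨y, hy, hfy⟩
  have hfh : f h ∈ c0 :: cr := hp.symm.mem_iff.1 (List.mem_map_of_mem (List.mem_cons_self))
  have h1 : pvLexLt (f h) (pvHeapMin c0 cr) = false := pvHeapMin_not_lt c0 cr _ hfh
  have h2 : pvLexLt (pvHeapMin c0 cr) (f h) = false := by
    rcases List.mem_cons.1 hy with rfl | hy'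
    · rw [← hfy]; exact pvLexLt_irrefl _
    · rw [← hfy]; exact (List.pairwise_cons.1 hs).1 y hy'
  exact pvLexLt_asymm_eq h2 h1

-- main bisimulation: A's heap contents a permutation of B's sorted list's image
theorem pvLoop_eq : ∀ (n : Nat) (cs ds : List (Int × String)) (cs' ds' : List (String × Int)),
    cs.length + ds.length ≤ n →
    cs.Perm (cs'.map pvTc) → cs'.Pairwise (fun a b => pvLexLt (pvTc b) (pvTc a) = false) →
    ds.Perm (ds'.map pvTd) → ds'.Pairwise (fun a b => pvLexLt (pvTd b) (pvTd a) = false) →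
    pvLoopA cs ds = pvLoopB cs' ds' := by
  intro n
  induction n with
  | zero =>
    intro cs ds cs' ds' hlen hpc _ _ _
    have hcs : cs = [] := List.eq_nil_of_length_eq_zero (by omega)
    have hcs' : cs' = [] := by
      have hl := hpc.length_eq
      rw [hcs] at hl; simp at hl
      exact List.eq_nil_of_length_eq_zero hl.symm
    subst hcs; subst hcs'
    simp [pvLoopA, pvLoopB]
  | succ n ih =>
    intro cs ds cs' ds' hlen hpc hsc hpd hsd
    rcases cs' with _ | ⟨⟨cp, ca⟩, cr'⟩
    · have hcs : cs = [] := List.perm_nil.1 (by simpa using hpc)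
      subst hcs; simp [pvLoopA, pvLoopB]
    rcases ds' with _ | ⟨⟨dp, da⟩, dr'⟩
    · have hds : ds = [] := List.perm_nil.1 (by simpa using hpd)
      subst hds; cases cs <;> simp [pvLoopA, pvLoopB]
    rcases cs with _ | ⟨c0, cr⟩
    · exact absurd hpc.length_eq (by simp)
    rcases ds with _ | ⟨d0, dr⟩
    · exact absurd hpd.length_eq (by simp)
    have hC : pvHeapMin c0 cr = pvTc (cp, ca) := pvHeadMin pvTc c0 cr _ _ hpc hsc
    have hD : pvHeapMin d0 dr = pvTd (dp, da) := pvHeadMin pvTd d0 dr _ _ hpd hsd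
    have hC' : pvHeapMin c0 cr = ((-ca, cp) : Int × String) := hC
    have hD' : pvHeapMin d0 dr = ((da, dp) : Int × String) := hD
    have hpc1 : ((c0 :: cr).erase ((-ca, cp) : Int × String)).Perm (cr'.map pvTc) := by
      have := hpc.erase (pvTc (cp, ca))
      simpa [List.erase_cons_head, pvTc] using this
    have hpd1 : ((d0 :: dr).erase ((da, dp) : Int × String)).Perm (dr'.map pvTd) := by
      have := hpd.erase (pvTd (dp, da))
      simpa [List.erase_cons_head, pvTd] using this
    have hlc : ((c0 :: cr).erase ((-ca, cp) : Int × String)).length = cr.length := by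
      have hmem : ((-ca, cp) : Int × String) ∈ c0 :: cr := by
        rw [← hC']; exact pvPick_mem pvLexLt cr c0
      have := List.length_erase_of_mem hmem
      simpa using this
    have hld : ((d0 :: dr).erase ((da, dp) : Int × String)).length = dr.length := by
      have hmem : ((da, dp) : Int × String) ∈ d0 :: dr := by
        rw [← hD']; exact pvPick_mem pvLexLt dr d0
      have := List.length_erase_of_mem hmem
      simpa using this
    simp only [pvLoopA, pvLoopB]
    rw [hC, hD]
    simp only [pvTc, pvTd, neg_neg]
    rw [min_comm (-da) ca]
    set s := min ca (-da) with hs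
    have htc : cr'.Pairwise (fun a b => pvLexLt (pvTc b) (pvTc a) = false) :=
      (List.pairwise_cons.1 hsc).2
    have htd : dr'.Pairwise (fun a b => pvLexLt (pvTd b) (pvTd a) = false) :=
      (List.pairwise_cons.1 hsd).2
    by_cases hcc : ca > s
    · have hccB : ca - s > 0 := by omega
      have hdd : ¬(-da > s) := by rcases min_choice ca (-da) with h | h <;> omega
      have hddB : ¬(da + s < 0) := by omega
      rw [if_pos hcc, if_pos hccB, if_neg hdd, if_neg hddB]
      congr 1
      refine ih _ _ _ _ ?_ ?_ ?_ ?_ ?_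
      · simp only [List.length_append, List.length_cons, List.length_nil,
          pvIns_length, hlc, hld] at *
        omega
      · rw [pvIns_eq_insertBy]
        have hw : pvTc (cp, ca - s) = ((-ca + s, cp) : Int × String) := by
          simp only [pvTc, Prod.mk.injEq]; exact ⟨by ring, trivial⟩
        rw [← hw]
        refine (hpc1.append (List.Perm.refl _)).trans ?_
        refine (List.perm_append_singleton _ _).trans ?_
        simpa using ((PySem.List.insertBy_perm _ (cp, ca - s) cr').map pvTc).symm
      · rw [pvIns_eq_insertBy]
        exact pvInsertBy_pairwise _ (pvT_lex_trans true) (pvT_lex_asym true) _ _ htc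
      · exact hpd1
      · exact htd
    · have hccB : ¬(ca - s > 0) := by omega
      rw [if_neg hcc, if_neg hccB]
      by_cases hdd : -da > s
      · have hddB : da + s < 0 := by omega
        rw [if_pos hdd, if_pos hddB]
        congr 1
        refine ih _ _ _ _ ?_ ?_ ?_ ?_ ?_
        · simp only [List.length_append, List.length_cons, List.length_nil,
            pvIns_length, hlc, hld] at *
          omega
        · exact hpc1
        · exact htc
        · rw [pvIns_eq_insertBy]
          have hw : pvTd (dp, da + s) = ((da + s, dp) : Int × String) := rfl
          rw [← hw]
          refine (hpd1.append (List.Perm.refl _)).trans ?_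
          refine (List.perm_append_singleton _ _).trans ?_
          simpa using ((PySem.List.insertBy_perm _ (dp, da + s) dr').map pvTd).symm
        · rw [pvIns_eq_insertBy]
          exact pvInsertBy_pairwise _ (pvT_lex_trans false) (pvT_lex_asym false) _ _ htd
      · have hddB : ¬(da + s < 0) := by omega
        rw [if_neg hdd, if_neg hddB]
        congr 1
        refine ih _ _ _ _ ?_ ?_ ?_ ?_ ?_
        · simp only [List.length_cons, hlc, hld] at *
          omega
        · exact hpc1
        · exact htc
        · exact hpd1
        · exact htd

theorem pvInitC (l : List (String × Int)) :
    l.filterMap (fun pa => if pa.2 > 0 then some (-pa.2, pa.1) else none)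
      = (l.filter (fun pa => decide (pa.2 > 0))).map pvTc := by
  induction l with
  | nil => rfl
  | cons p t ih => by_cases h : p.2 > 0 <;> simp [h, ih, pvTc]

theorem pvInitD (l : List (String × Int)) :
    l.filterMap (fun pa => if pa.2 < 0 then some (pa.2, pa.1) else none)
      = (l.filter (fun pa => decide (pa.2 < 0))).map pvTd := by
  induction l with
  | nil => rfl
  | cons p t ih => by_cases h : p.2 < 0 <;> simp [h, ih, pvTd]

-- ===== VERDICT (by name: the statement is the Claim_ definition above) =====
theorem settle_debts_spec : Claim_equal_settle_debts := by
  intro net _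
  unfold Spec_settle_debts settle_debts settle_debts_alt
  have hc := pvSorted2_eq true (net.filter (fun pa => decide (pa.2 > 0)))
  rw [if_pos rfl] at hc
  have hd := pvSorted2_eq false (net.filter (fun pa => decide (pa.2 < 0)))
  rw [if_neg (by simp)] at hd
  rw [hc, hd]
  refine pvLoop_eq _ _ _ _ _ le_rfl ?_ ?_ ?_ ?_
  · rw [pvInitC]
    exact ((pvSorted2_perm' true _).map pvTc).symm
  · exact pvFoldlInsert_pairwise _ (pvT_lex_trans true) (pvT_lex_asym true) _ [] (by simp)
  · rw [pvInitD]
    exact ((pvSorted2_perm' false _).map pvTd).symm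
  · exact pvFoldlInsert_pairwise _ (pvT_lex_trans false) (pvT_lex_asym false) _ [] (by simp)
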